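-- pv_equiv track=rewrite | github.com/sahanpallage/TJH | backend/test_theirstack_accuracy.py | check_employment_type_match
-- ===== SOURCE A (Python) =====
-- from typing import Optional, List, Dict, Any
--
-- def check_employment_type_match(input_types: List[str], output_type: any) -> bool:
--     """Check if output employment type matches input"""
--     if not input_types:
--         return True
--
--     # Handle both string and other types
--     output_lower = str(output_type).lower() if output_type else ""
--
--     # If output is empty, we can't verify - but API filtered, so assume match
--     if not output_lower:
--         return True  # API filtered by employment_statuses_or, so likely correct
--
--     # Check for common variations
--     for emp_type in input_types:
--         emp_upper = emp_type.upper()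
--         if "FULL_TIME" in emp_upper or "FULLTIME" in emp_upper:
--             # Check for full-time variations
--             if any(term in output_lower for term in ["full_time", "fulltime", "full-time", "full time", "permanent"]):
--                 return True
--         elif "PART_TIME" in emp_upper or "PARTTIME" in emp_upper:
--             # Check for part-time variations
--             if any(term in output_lower for term in ["part_time", "parttime", "part-time", "part time", "contract"]):
--                 return True
--         else:
--             # Direct match
--             if emp_type.lower() in output_lower:
--                 return True
--
--     return False
-- ===== SOURCE B (Python) =====
-- FULL_TERMS = ["full_time", "fulltime", "full-time", "full time", "permanent"]
-- PART_TERMS = ["part_time", "parttime", "part-time", "part time", "contract"]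
--
-- def check_employment_type_match(input_types, output_type):
--     if not input_types:
--         return True
--     output_lower = str(output_type).lower() if output_type else ""
--     if not output_lower:
--         return True
--     # Pass 1: partition the input types into three buckets.
--     want_full = False
--     want_part = False
--     literals = []
--     for t in input_types:
--         u = t.upper()
--         if "FULL_TIME" in u or "FULLTIME" in u:
--             want_full = True
--         elif "PART_TIME" in u or "PARTTIME" in u:
--             want_part = True
--         else:
--             literals.append(t.lower())
--     # Pass 2: test the output against each bucket at most once.
--     if want_full and any(term in output_lower for term in FULL_TERMS):
--         return True
--     if want_part and any(term in output_lower for term in PART_TERMS):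
--         return True
--     return any(lit in output_lower for lit in literals)
-- ===== Notes on version B (the rewrite author's own statement) =====
-- stated objective: alternative
-- what changed: B replaces A's interleaved early-return loop (which re-scans the output against the five keyword variants for every full/part-time input type) by two staged passes: first partition the input types into buckets (full-time flag, part-time flag, list of literal lowercased types), then test the output once per bucket; the keyword scans run at most once in total and match order is irrelevant since the result is a pure disjunction.
import Mathlib
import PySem

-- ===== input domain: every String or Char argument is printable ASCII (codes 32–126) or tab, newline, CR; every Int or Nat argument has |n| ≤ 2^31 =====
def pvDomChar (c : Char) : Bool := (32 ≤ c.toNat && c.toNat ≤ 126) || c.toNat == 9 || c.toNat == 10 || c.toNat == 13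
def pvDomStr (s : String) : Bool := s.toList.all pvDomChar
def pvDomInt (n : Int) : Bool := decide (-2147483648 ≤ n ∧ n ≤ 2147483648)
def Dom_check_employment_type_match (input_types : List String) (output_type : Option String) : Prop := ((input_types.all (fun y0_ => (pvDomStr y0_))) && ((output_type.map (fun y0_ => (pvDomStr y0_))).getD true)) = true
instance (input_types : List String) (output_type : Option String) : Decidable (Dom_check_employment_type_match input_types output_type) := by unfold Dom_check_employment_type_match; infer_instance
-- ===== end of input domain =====

-- B partitions the input types into buckets first and tests the output once per bucket,
-- replacing A's interleaved early-return loop that re-scans the keywords per type (objective: alternative).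

-- ===== PORT A =====
-- str(output_type).lower() if output_type else ""  (output_type : Option String; None and "" are falsy)
def pvOutLower (output_type : Option String) : String :=
  match output_type with
  | none => ""
  | some s => if s = "" then "" else PySem.Str.lower s

def pvFullTerms : List String := ["full_time", "fulltime", "full-time", "full time", "permanent"]
def pvPartTerms : List String := ["part_time", "parttime", "part-time", "part time", "contract"]

-- the for-loop of A with its early returns
def pvLoopA (output_lower : String) : List String → Bool
  | [] => false
  | emp_type :: rest =>
    let emp_upper := PySem.Str.upper emp_type
    if PySem.Str.isIn "FULL_TIME" emp_upper || PySem.Str.isIn "FULLTIME" emp_upper then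
      if pvFullTerms.any (fun term => PySem.Str.isIn term output_lower) then true
      else pvLoopA output_lower rest
    else if PySem.Str.isIn "PART_TIME" emp_upper || PySem.Str.isIn "PARTTIME" emp_upper then
      if pvPartTerms.any (fun term => PySem.Str.isIn term output_lower) then true
      else pvLoopA output_lower rest
    else
      if PySem.Str.isIn (PySem.Str.lower emp_type) output_lower then true
      else pvLoopA output_lower rest

def check_employment_type_match (input_types : List String) (output_type : Option String) : Bool :=
  if input_types = [] then true
  else
    let output_lower := pvOutLower output_type
    if output_lower = "" then true
    else pvLoopA output_lower input_types

-- ===== PORT B =====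
-- pass 1 of B: partition the input types into (want_full, want_part, literals)
def pvBucketStep (acc : Bool × Bool × List String) (t : String) : Bool × Bool × List String :=
  let u := PySem.Str.upper t
  if PySem.Str.isIn "FULL_TIME" u || PySem.Str.isIn "FULLTIME" u then
    (true, acc.2.1, acc.2.2)
  else if PySem.Str.isIn "PART_TIME" u || PySem.Str.isIn "PARTTIME" u then
    (acc.1, true, acc.2.2)
  else
    (acc.1, acc.2.1, acc.2.2 ++ [PySem.Str.lower t])

def check_employment_type_match_alt (input_types : List String) (output_type : Option String) : Bool :=
  if input_types = [] then true
  else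
    let output_lower := pvOutLower output_type
    if output_lower = "" then true
    else
      let b := input_types.foldl pvBucketStep (false, false, [])
      if b.1 && pvFullTerms.any (fun term => PySem.Str.isIn term output_lower) then true
      else if b.2.1 && pvPartTerms.any (fun term => PySem.Str.isIn term output_lower) then true
      else b.2.2.any (fun lit => PySem.Str.isIn lit output_lower)

-- ===== PRECONDITION & SPEC =====
def Spec_check_employment_type_match (input_types : List String) (output_type : Option String) (out : Bool) : Prop := out = check_employment_type_match_alt input_types output_type
instance (input_types : List String) (output_type : Option String) (out : Bool) : Decidable (Spec_check_employment_type_match input_types output_type out) := by unfold Spec_check_employment_type_match; infer_instance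

-- ===== CLAIM (what is proved, stated in full; the proofs are below) =====
def Claim_equal_check_employment_type_match : Prop := ∀ (input_types : List String) (output_type : Option String), Dom_check_employment_type_match input_types output_type → Spec_check_employment_type_match input_types output_type (check_employment_type_match input_types output_type)

-- ===== LEMMAS AND PROOFS =====
-- whether a single input type matches the (non-empty) lowered output
def pvMatchOne (ol : String) (t : String) : Bool :=
  let u := PySem.Str.upper t
  if PySem.Str.isIn "FULL_TIME" u || PySem.Str.isIn "FULLTIME" u then
    pvFullTerms.any (fun term => PySem.Str.isIn term ol)
  else if PySem.Str.isIn "PART_TIME" u || PySem.Str.isIn "PARTTIME" u then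
    pvPartTerms.any (fun term => PySem.Str.isIn term ol)
  else PySem.Str.isIn (PySem.Str.lower t) ol

theorem pvLoopA_eq_any (ol : String) (l : List String) :
    pvLoopA ol l = l.any (pvMatchOne ol) := by
  induction l with
  | nil => simp [pvLoopA]
  | cons t rest ih =>
    simp only [pvLoopA, pvMatchOne, List.any_cons]
    split_ifs <;> simp_all

-- combining the buckets with the output tests
def pvCombine (ol : String) (b : Bool × Bool × List String) : Bool :=
  if b.1 && pvFullTerms.any (fun term => PySem.Str.isIn term ol) then true
  else if b.2.1 && pvPartTerms.any (fun term => PySem.Str.isIn term ol) then true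
  else b.2.2.any (fun lit => PySem.Str.isIn lit ol)

theorem pvCombine_eq (ol : String) (b : Bool × Bool × List String) :
    pvCombine ol b =
      ((b.1 && pvFullTerms.any (fun term => PySem.Str.isIn term ol)) ||
       ((b.2.1 && pvPartTerms.any (fun term => PySem.Str.isIn term ol)) ||
        b.2.2.any (fun lit => PySem.Str.isIn lit ol))) := by
  unfold pvCombine
  cases hF : (b.1 && pvFullTerms.any (fun term => PySem.Str.isIn term ol)) <;>
    cases hP : (b.2.1 && pvPartTerms.any (fun term => PySem.Str.isIn term ol)) <;>
      simp [hF, hP]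

theorem pvCombine_step (ol : String) (acc : Bool × Bool × List String) (t : String) :
    pvCombine ol (pvBucketStep acc t) = (pvCombine ol acc || pvMatchOne ol t) := by
  obtain ⟨bf, bp, os⟩ := acc
  simp only [pvCombine_eq, pvBucketStep, pvMatchOne]
  split_ifs <;>
    cases bf <;> cases bp <;>
      simp [List.any_append, Bool.or_comm, Bool.or_left_comm, Bool.or_assoc]

theorem pvCombine_foldl (ol : String) (l : List String) (acc : Bool × Bool × List String) :
    pvCombine ol (l.foldl pvBucketStep acc) = (pvCombine ol acc || l.any (pvMatchOne ol)) := by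
  induction l generalizing acc with
  | nil => simp
  | cons t rest ih =>
    rw [List.foldl_cons, ih, List.any_cons, pvCombine_step, Bool.or_assoc]

-- ===== VERDICT (by name: the statement is the Claim_ definition above) =====
theorem pvBody_eq (ol : String) (l : List String) :
    pvLoopA ol l = pvCombine ol (l.foldl pvBucketStep (false, false, [])) := by
  rw [pvLoopA_eq_any, pvCombine_foldl]
  simp [pvCombine]

theorem check_employment_type_match_spec : Claim_equal_check_employment_type_match := by
  intro input_types output_type _
  show check_employment_type_match input_types output_type
      = check_employment_type_match_alt input_types output_type
  unfold check_employment_type_match check_employment_type_match_alt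
  by_cases h1 : input_types = []
  · rw [if_pos h1, if_pos h1]
  · rw [if_neg h1, if_neg h1]
    by_cases h2 : pvOutLower output_type = ""
    · rw [if_pos h2, if_pos h2]
    · rw [if_neg h2, if_neg h2]
      exact pvBody_eq (pvOutLower output_type) input_types
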